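-- pv_equiv track=rewrite | github.com/raindow1/performace_lab_tz | task1/task1.py | circular_list
-- ===== SOURCE A (Python) =====
-- def circular_list(n, m):
--     """
--      Создание кругового массива
--
--      :param n: длина массива
--      :param m: длина интервала
--      :return: искомый путь
--      """
--     circular_list = list(range(1, n + 1))
--
--     # Переменная для хранения начальных элементов интервалов
--     result_path = []
--
--     start_index = 0
--
--     while True:
--         # Определяем конечный индекс текущего интервала
--         end_index = (start_index + m - 1) % n
--
--         # Добавляем начальный элемент интервала в путь
--         result_path.append(circular_list[start_index])
--
--         if end_index == 0:
--             break
--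
--         start_index = end_index
--
--     return result_path
-- ===== SOURCE B (Python) =====
-- def circular_list(n, m):
--     """Closed form: the walk visits k*(m-1) mod n for k = 0,1,...; it returns to 0
--     after exactly n // gcd(n, m-1) steps, so build the path directly."""
--     step = (m - 1) % n
--     a, b = n, step
--     while b:
--         a, b = b, a % b
--     return [(k * step) % n + 1 for k in range(n // a)]
-- ===== Notes on version B (the rewrite author's own statement) =====
-- stated objective: faster
-- what changed: B replaces A's range-list construction plus step-by-step walk with a closed form: it computes g = gcd(n, (m-1) mod n) and emits the n/g path elements k*(m-1) mod n + 1 directly, never materialising the length-n array.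
import Mathlib
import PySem

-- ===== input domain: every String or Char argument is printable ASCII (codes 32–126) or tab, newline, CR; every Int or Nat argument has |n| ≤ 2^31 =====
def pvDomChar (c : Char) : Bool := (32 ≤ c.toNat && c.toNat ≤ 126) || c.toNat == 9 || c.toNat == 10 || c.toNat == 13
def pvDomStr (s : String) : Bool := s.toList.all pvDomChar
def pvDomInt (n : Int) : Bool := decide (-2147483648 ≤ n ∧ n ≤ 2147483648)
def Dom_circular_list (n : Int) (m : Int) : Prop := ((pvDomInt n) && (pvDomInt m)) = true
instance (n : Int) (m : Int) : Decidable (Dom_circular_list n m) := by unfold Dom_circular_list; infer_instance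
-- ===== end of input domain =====

-- B: closed form via gcd — faster: it never builds the length-n array A materialises.
-- A mutates nothing; the equivalence is about the return value.

-- ===== PORT A =====
-- A's `while True` loop; fuel n.toNat + 1 suffices (proved below); none = the loop's
-- IndexError (empty array for n ≤ 0). The break test follows the append, as in A.
def loopA (arr : List Int) (n m : Int) : Nat → Int → List Int → Option (List Int)
  | 0, _, _ => none
  | f+1, s, acc =>
    let e := PySem.Int.mod (s + m - 1) n
    match PySem.List.pyGet? arr s with
    | none => none
    | some v => if e = 0 then some (acc ++ [v]) else loopA arr n m f e (acc ++ [v])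

def circular_list (n : Int) (m : Int) : List Int :=
  let arr := PySem.List.pyRange 1 (n + 1) 1
  (loopA arr n m (n.toNat + 1) 0 []).getD []

-- ===== PORT B =====
-- Source B's hand-written Euclid loop `while b: a, b = b, a % b`; on Pre_ (n ≥ 1) both
-- arguments are nonnegative, so Nat arithmetic is exact.
def gcdLoop (a b : Nat) : Nat :=
  if h : b = 0 then a else gcdLoop b (a % b)
termination_by b
decreasing_by exact Nat.mod_lt _ (Nat.pos_of_ne_zero h)

def circular_list_alt (n : Int) (m : Int) : List Int :=
  let step := PySem.Int.mod (m - 1) n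
  let g := gcdLoop n.toNat step.toNat
  let count := PySem.Int.floordiv n (g : Int)
  (PySem.List.pyRange 0 count 1).map (fun k => PySem.Int.mod (k * step) n + 1)

-- ===== PRECONDITION & SPEC =====
-- Pre_: for n ≤ 0 the Python A raises (ZeroDivisionError on % n for n = 0, IndexError
-- on the empty array for n < 0); those inputs are excluded.
def Pre_circular_list (n : Int) (m : Int) : Prop := 1 ≤ n
instance (n : Int) (m : Int) : Decidable (Pre_circular_list n m) := by unfold Pre_circular_list; infer_instance
def pvWitness_circular_list : Int × Int := (6, 3)

def Spec_circular_list (n : Int) (m : Int) (out : List Int) : Prop := out = circular_list_alt n m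
instance (n : Int) (m : Int) (out : List Int) : Decidable (Spec_circular_list n m out) := by unfold Spec_circular_list; infer_instance

-- ===== CLAIM (what is proved, stated in full; the proofs are below) =====
def Claim_equal_circular_list : Prop := ∀ (n : Int) (m : Int), Dom_circular_list n m → Pre_circular_list n m → Spec_circular_list n m (circular_list n m)

-- ===== LEMMAS AND PROOFS =====

lemma gcdLoop_eq_gcd (a b : Nat) : gcdLoop a b = Nat.gcd a b := by
  induction b using Nat.strong_induction_on generalizing a with
  | _ b ih =>
    rw [gcdLoop]
    split
    · simp [*]
    · rename_i h
      rw [ih (a % b) (Nat.mod_lt _ (Nat.pos_of_ne_zero h)) b]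
      rw [Nat.gcd_comm b (a % b), ← Nat.gcd_rec b a, Nat.gcd_comm]

-- F1: the walk is back at 0 after N / gcd N S steps.
lemma walk_closes (N S : Nat) : (N / N.gcd S * S) % N = 0 := by
  obtain ⟨s', hs'⟩ := Nat.gcd_dvd_right N S
  have hNe : N / N.gcd S * N.gcd S = N := Nat.div_mul_cancel (Nat.gcd_dvd_left N S)
  have h : N / N.gcd S * S = N * s' := by
    nth_rewrite 2 [hs']
    rw [← mul_assoc, hNe]
  rw [h, Nat.mul_mod_right]

-- F2: and not earlier.
lemma walk_min (N S k : Nat) (hN : 0 < N) (hk0 : 0 < k) (hk : k < N / N.gcd S)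
    (hdvd : N ∣ k * S) : False := by
  rcases Nat.eq_zero_or_pos S with hS | hS
  · subst hS; simp [Nat.div_self hN] at hk; omega
  · have hg : 0 < N.gcd S := Nat.gcd_pos_of_pos_right _ hS
    have hco : Nat.Coprime (N / N.gcd S) (S / N.gcd S) := Nat.coprime_div_gcd_div_gcd hg
    have hNe : N.gcd S * (N / N.gcd S) = N := Nat.mul_div_cancel' (Nat.gcd_dvd_left N S)
    have hSe : N.gcd S * (S / N.gcd S) = S := Nat.mul_div_cancel' (Nat.gcd_dvd_right N S)
    have hx : k * S = N.gcd S * (k * (S / N.gcd S)) := by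
      conv_lhs => rw [← hSe]
      ring
    have h1 : N / N.gcd S ∣ k * (S / N.gcd S) := by
      have hd : N.gcd S * (N / N.gcd S) ∣ N.gcd S * (k * (S / N.gcd S)) := by
        rw [hNe, ← hx]; exact hdvd
      exact (mul_dvd_mul_iff_left hg.ne').mp hd
    have h2 : N / N.gcd S ∣ k := hco.dvd_of_dvd_mul_right h1
    exact absurd (Nat.le_of_dvd hk0 h2) (by omega)

-- The loop, unrolled: from position (i*S) % N with enough fuel it emits the
-- remaining N / gcd N S - i elements of the closed-form path.
lemma loopA_eq (arr : List Int) (n m : Int) (N S : Nat) (hN : 0 < N)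
    (hget : ∀ k : Nat, k < N → PySem.List.pyGet? arr ((k : Nat) : Int) = some (((k : Nat) : Int) + 1))
    (hstep : ∀ i : Nat, PySem.Int.mod ((((i * S) % N : Nat) : Int) + m - 1) n
      = ((((i + 1) * S) % N : Nat) : Int)) :
    ∀ (f i : Nat) (acc : List Int), i < N / N.gcd S → N / N.gcd S - i ≤ f →
      loopA arr n m f ((((i * S) % N : Nat) : Int)) acc
        = some (acc ++ (List.range (N / N.gcd S - i)).map
            (fun j => ((((i + j) * S) % N : Nat) : Int) + 1)) := by
  intro f
  induction f with
  | zero => intro i acc hi hf; omega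
  | succ f ih =>
    intro i acc hi hf
    rw [loopA, hget _ (Nat.mod_lt _ hN), hstep i]
    dsimp only
    by_cases hz : ((i + 1) * S) % N = 0
    · have hL : i + 1 = N / N.gcd S := by
        rcases Nat.lt_or_ge (i + 1) (N / N.gcd S) with h | h
        · exact absurd (walk_min N S (i + 1) hN (by omega) h (Nat.dvd_of_mod_eq_zero hz)) not_false
        · omega
      have h1 : N / N.gcd S - i = 1 := by omega
      simp [hz, h1]
    · have hlt : i + 1 < N / N.gcd S := by
        rcases Nat.lt_or_ge (i + 1) (N / N.gcd S) with h | h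
        · exact h
        · have : i + 1 = N / N.gcd S := by omega
          rw [this] at hz
          exact absurd (walk_closes N S) hz
      have hz' : ((((i + 1) * S) % N : Nat) : Int) ≠ 0 := by exact_mod_cast hz
      rw [if_neg hz', ih (i + 1) (acc ++ [(((i * S) % N : Nat) : Int) + 1]) hlt (by omega)]
      have hr : N / N.gcd S - i = (N / N.gcd S - (i + 1)) + 1 := by omega
      rw [hr, List.range_succ_eq_map, List.map_cons, List.map_map]
      have hfe : ∀ a ∈ List.range (N / N.gcd S - (i + 1)),
          (((((i + 1) + a) * S % N : Nat)) : Int) + 1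
            = ((fun j => ((((i + j) * S % N : Nat)) : Int) + 1) ∘ Nat.succ) a := by
        intro a _
        have hia : (i + 1) + a = i + Nat.succ a := by omega
        simp only [Function.comp_apply, hia]
      rw [← List.map_congr_left hfe]
      simp

-- ===== VERDICT (by name: the statement is the Claim_ definition above) =====
theorem circular_list_spec : Claim_equal_circular_list := by
  intro n m _ hpre
  unfold Pre_circular_list at hpre
  unfold Spec_circular_list circular_list circular_list_alt
  dsimp only
  have hn0 : (0 : Int) < n := by omega
  set N := n.toNat with hNdef
  have hnN : n = (N : Int) := by omega
  have hN : 0 < N := by omega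
  have hmod : PySem.Int.mod (m - 1) n = (m - 1) % n := PySem.Int.mod_eq_emod_of_pos hn0
  set S : Nat := ((m - 1) % n).toNat with hSdef
  have hSnn : 0 ≤ (m - 1) % n := Int.emod_nonneg _ (by omega)
  have hstep_eq : PySem.Int.mod (m - 1) n = (S : Int) := by
    rw [hmod, hSdef, Int.toNat_of_nonneg hSnn]
  have hSlt : S < N := by
    have h1 : (m - 1) % n < n := Int.emod_lt_of_pos _ hn0
    omega
  have hcast : ∀ a : Nat, ((a % N : Nat) : Int) = (a : Int) % n := by
    intro a; rw [hnN]; push_cast; ring_nf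
  have harr : ∀ k : Nat, k < N →
      PySem.List.pyGet? (PySem.List.pyRange 1 (n + 1) 1) ((k : Nat) : Int)
        = some (((k : Nat) : Int) + 1) := by
    intro k hk
    rw [PySem.List.pyGet?_natCast, PySem.List.pyRange_one]
    have hlen : (n + 1 - 1).toNat = N := by omega
    rw [hlen]
    simp [hk, add_comm]
  have hstep : ∀ i : Nat, PySem.Int.mod ((((i * S) % N : Nat) : Int) + m - 1) n
      = ((((i + 1) * S) % N : Nat) : Int) := by
    intro i
    rw [PySem.Int.mod_eq_emod_of_pos hn0, hcast (i * S), hcast ((i + 1) * S)]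
    have hm1 : (m - 1) % n = (S : Int) := by rw [← hmod, hstep_eq]
    have hx : (((i + 1) * S : Nat) : Int) = ((i * S : Nat) : Int) + (S : Int) := by
      push_cast; ring
    rw [hx]
    have h1 : (((i * S : Nat) : Int) % n + m - 1) = (((i * S : Nat) : Int) % n + (m - 1)) := by
      ring
    rw [h1, Int.add_emod (((i * S : Nat) : Int) % n) (m - 1) n,
        Int.emod_emod_of_dvd _ dvd_rfl, hm1]
    conv_rhs => rw [Int.add_emod]
    have hSn : ((S : Nat) : Int) % n = (S : Int) :=
      Int.emod_eq_of_lt (Int.natCast_nonneg S) (by omega)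
    rw [hSn]
  -- assemble both sides
  have hgpos : 0 < N.gcd S := Nat.gcd_pos_of_pos_left _ hN
  have hLpos : 0 < N / N.gcd S :=
    Nat.div_pos (Nat.le_of_dvd hN (Nat.gcd_dvd_left N S)) hgpos
  have hA := loopA_eq (PySem.List.pyRange 1 (n + 1) 1) n m N S hN harr hstep
    (N + 1) 0 [] hLpos (by have := Nat.div_le_self N (N.gcd S); omega)
  have h0 : ((((0 * S) % N : Nat)) : Int) = 0 := by simp
  rw [h0] at hA
  rw [hA, hstep_eq, Int.toNat_natCast, gcdLoop_eq_gcd, hnN, PySem.Int.floordiv_natCast,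
      PySem.List.pyRange_zero_natCast]
  simp only [Option.getD_some, List.nil_append, List.map_map]
  apply List.map_congr_left
  intro j _
  simp only [Function.comp, Nat.zero_add]
  have hjs : ((j : Int) * (S : Int)) = ((j * S : Nat) : Int) := by push_cast; ring
  rw [hjs, PySem.Int.mod_natCast]
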